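-- pv_equiv track=rewrite | github.com/miadog007/Evaluation-of-Scanning-Taxonomies | 2018_fukuda/anlysis/tcp_analysis.py | tcp_remove_key_other
-- ===== SOURCE A (Python) =====
-- def tcp_remove_key_other(tcp_other, tcp_hport_scans, tcp_lport_scans, tcp_hnetwork_scans, tcp_lnetwork_scans, tcp_oflow_final, small_syns_final):
--     '''
--     Removes all Source IPs categories in an anomaly
--
--     Input:
--         All TCP dicts
--     Output:
--         tcp_other dict
--     '''
--
--     keys_to_remove = {key[0] for key in [*tcp_hport_scans.keys(), *tcp_lport_scans.keys(), *tcp_hnetwork_scans.keys(), *tcp_lnetwork_scans.keys(), *tcp_oflow_final.keys()]}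
--
--     for key in list(tcp_other.keys()):
--         if key in keys_to_remove:
--             del tcp_other[key]
--
--     for key in list(tcp_other.keys()):
--         if key in small_syns_final:
--             del tcp_other[key]
--
--     return tcp_other
-- ===== SOURCE B (Python) =====
-- def tcp_remove_key_other(tcp_other, tcp_hport_scans, tcp_lport_scans, tcp_hnetwork_scans, tcp_lnetwork_scans, tcp_oflow_final, small_syns_final):
--     '''
--     Removes all Source IPs categories in an anomaly (pop the removal keys
--     in place instead of scanning tcp_other and testing membership).
--     '''
--     for src in (tcp_hport_scans, tcp_lport_scans, tcp_hnetwork_scans, tcp_lnetwork_scans, tcp_oflow_final):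
--         for key in src:
--             tcp_other.pop(key[0], None)
--     for key in small_syns_final:
--         tcp_other.pop(key, None)
--     return tcp_other
-- ===== Notes on version B (the rewrite author's own statement) =====
-- stated objective: simpler
-- what changed: Instead of building a removal set and scanning tcp_other twice testing membership, B iterates over the five anomaly dicts and small_syns_final directly and pops each key from tcp_other in place (pop with default), so no set is built and tcp_other is never scanned.
import Mathlib
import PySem

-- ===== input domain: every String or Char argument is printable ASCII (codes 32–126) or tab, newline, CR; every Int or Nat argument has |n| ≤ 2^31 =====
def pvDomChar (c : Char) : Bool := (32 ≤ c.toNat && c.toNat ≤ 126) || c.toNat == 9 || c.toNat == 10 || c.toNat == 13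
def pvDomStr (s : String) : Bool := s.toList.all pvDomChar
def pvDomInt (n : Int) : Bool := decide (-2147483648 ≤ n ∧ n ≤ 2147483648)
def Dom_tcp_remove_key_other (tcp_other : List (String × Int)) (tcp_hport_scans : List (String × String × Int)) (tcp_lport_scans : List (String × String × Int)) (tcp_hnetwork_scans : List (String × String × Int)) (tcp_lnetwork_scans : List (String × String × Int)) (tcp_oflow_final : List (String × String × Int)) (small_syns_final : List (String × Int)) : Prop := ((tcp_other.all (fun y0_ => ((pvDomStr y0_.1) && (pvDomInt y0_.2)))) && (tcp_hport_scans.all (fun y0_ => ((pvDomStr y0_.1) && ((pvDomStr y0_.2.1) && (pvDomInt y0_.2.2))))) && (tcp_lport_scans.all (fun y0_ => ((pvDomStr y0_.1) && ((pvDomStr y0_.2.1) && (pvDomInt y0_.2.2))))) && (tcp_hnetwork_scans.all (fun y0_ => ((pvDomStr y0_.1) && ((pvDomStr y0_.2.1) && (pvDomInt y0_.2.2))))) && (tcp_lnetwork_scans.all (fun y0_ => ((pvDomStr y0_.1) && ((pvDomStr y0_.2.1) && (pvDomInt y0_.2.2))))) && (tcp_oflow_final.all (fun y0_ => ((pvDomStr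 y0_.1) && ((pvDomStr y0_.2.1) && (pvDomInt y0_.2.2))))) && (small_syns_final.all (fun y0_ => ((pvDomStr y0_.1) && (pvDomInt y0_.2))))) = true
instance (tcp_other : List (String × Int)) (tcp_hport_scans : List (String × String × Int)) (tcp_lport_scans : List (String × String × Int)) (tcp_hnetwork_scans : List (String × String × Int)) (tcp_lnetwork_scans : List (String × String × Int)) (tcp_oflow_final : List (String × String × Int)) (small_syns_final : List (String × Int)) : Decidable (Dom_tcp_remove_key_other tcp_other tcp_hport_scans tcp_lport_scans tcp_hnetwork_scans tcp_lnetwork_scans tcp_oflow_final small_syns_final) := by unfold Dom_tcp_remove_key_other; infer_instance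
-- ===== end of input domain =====

-- B replaces A's removal-set build and two membership-testing scans of tcp_other by popping each
-- removal key from tcp_other in place (objective: simpler); return value proved equal, same in-place mutation.
-- ===== PORT A =====
def tcp_remove_key_other (tcp_other : List (String × Int)) (tcp_hport_scans : List (String × String × Int)) (tcp_lport_scans : List (String × String × Int)) (tcp_hnetwork_scans : List (String × String × Int)) (tcp_lnetwork_scans : List (String × String × Int)) (tcp_oflow_final : List (String × String × Int)) (small_syns_final : List (String × Int)) : List (String × Int) :=
  -- keys_to_remove = {key[0] for key in [*d.keys() for the five anomaly dicts]}
  let keys_to_remove : PySem.Set String :=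
    PySem.Set.ofList ((tcp_hport_scans.map (·.1)) ++ (tcp_lport_scans.map (·.1)) ++
      (tcp_hnetwork_scans.map (·.1)) ++ (tcp_lnetwork_scans.map (·.1)) ++ (tcp_oflow_final.map (·.1)))
  -- for key in list(tcp_other.keys()): if key in keys_to_remove: del tcp_other[key]
  -- (del d[key] on a dict = drop the entry with that key; exact for unique keys, see Pre_)
  let d1 := (tcp_other.map (·.1)).foldl
    (fun d key => if keys_to_remove.contains key then d.eraseP (fun p => p.1 == key) else d) tcp_other
  -- for key in list(tcp_other.keys()): if key in small_syns_final: del tcp_other[key]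
  (d1.map (·.1)).foldl
    (fun d key => if (small_syns_final.map (·.1)).contains key then d.eraseP (fun p => p.1 == key) else d) d1

-- ===== PORT B =====
def tcp_remove_key_other_alt (tcp_other : List (String × Int)) (tcp_hport_scans : List (String × String × Int)) (tcp_lport_scans : List (String × String × Int)) (tcp_hnetwork_scans : List (String × String × Int)) (tcp_lnetwork_scans : List (String × String × Int)) (tcp_oflow_final : List (String × String × Int)) (small_syns_final : List (String × Int)) : List (String × Int) :=
  -- for src in (five anomaly dicts): for key in src: tcp_other.pop(key[0], None)
  let d1 := [tcp_hport_scans, tcp_lport_scans, tcp_hnetwork_scans, tcp_lnetwork_scans, tcp_oflow_final].foldl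
    (fun d src => src.foldl (fun d k => d.eraseP (fun p => p.1 == k.1)) d) tcp_other
  -- for key in small_syns_final: tcp_other.pop(key, None)
  small_syns_final.foldl (fun d k => d.eraseP (fun p => p.1 == k.1)) d1

-- ===== PRECONDITION & SPEC =====
-- Pre_ excludes only association lists in which tcp_other repeats a key: such a list represents no
-- Python dict (dict keys are unique), so no input on which the Python A returns is excluded.
def Pre_tcp_remove_key_other (tcp_other : List (String × Int)) (tcp_hport_scans : List (String × String × Int)) (tcp_lport_scans : List (String × String × Int)) (tcp_hnetwork_scans : List (String × String × Int)) (tcp_lnetwork_scans : List (String × String × Int)) (tcp_oflow_final : List (String × String × Int)) (small_syns_final : List (String × Int)) : Prop := (tcp_other.map Prod.fst).Nodup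
instance (tcp_other : List (String × Int)) (tcp_hport_scans : List (String × String × Int)) (tcp_lport_scans : List (String × String × Int)) (tcp_hnetwork_scans : List (String × String × Int)) (tcp_lnetwork_scans : List (String × String × Int)) (tcp_oflow_final : List (String × String × Int)) (small_syns_final : List (String × Int)) : Decidable (Pre_tcp_remove_key_other tcp_other tcp_hport_scans tcp_lport_scans tcp_hnetwork_scans tcp_lnetwork_scans tcp_oflow_final small_syns_final) := by unfold Pre_tcp_remove_key_other; infer_instance
def pvWitness_tcp_remove_key_other : (List (String × Int)) × (List (String × String × Int)) × (List (String × String × Int)) × (List (String × String × Int)) × (List (String × String × Int)) × (List (String × String × Int)) × (List (String × Int)) := ([("a", 1), ("b", 2)], [("a", "x", 3)], [], [], [], [], [("c", 4)])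
def Spec_tcp_remove_key_other (tcp_other : List (String × Int)) (tcp_hport_scans : List (String × String × Int)) (tcp_lport_scans : List (String × String × Int)) (tcp_hnetwork_scans : List (String × String × Int)) (tcp_lnetwork_scans : List (String × String × Int)) (tcp_oflow_final : List (String × String × Int)) (small_syns_final : List (String × Int)) (out : List (String × Int)) : Prop := out = tcp_remove_key_other_alt tcp_other tcp_hport_scans tcp_lport_scans tcp_hnetwork_scans tcp_lnetwork_scans tcp_oflow_final small_syns_final
instance (tcp_other : List (String × Int)) (tcp_hport_scans : List (String × String × Int)) (tcp_lport_scans : List (String × String × Int)) (tcp_hnetwork_scans : List (String × String × Int)) (tcp_lnetwork_scans : List (String × String × Int)) (tcp_oflow_final : List (String × String × Int)) (small_syns_final : List (String × Int)) (out : List (String × Int)) : Decidable (Spec_tcp_remove_key_other tcp_other tcp_hport_scans tcp_lport_scans tcp_hnetwork_scans tcp_lnetwork_scans tcp_oflow_final small_syns_final out) := by unfold Spec_tcp_remove_key_other; infer_instance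

-- ===== CLAIM (what is proved, stated in full; the proofs are below) =====
def Claim_equal_tcp_remove_key_other : Prop := ∀ (tcp_other : List (String × Int)) (tcp_hport_scans : List (String × String × Int)) (tcp_lport_scans : List (String × String × Int)) (tcp_hnetwork_scans : List (String × String × Int)) (tcp_lnetwork_scans : List (String × String × Int)) (tcp_oflow_final : List (String × String × Int)) (small_syns_final : List (String × Int)), Dom_tcp_remove_key_other tcp_other tcp_hport_scans tcp_lport_scans tcp_hnetwork_scans tcp_lnetwork_scans tcp_oflow_final small_syns_final → Pre_tcp_remove_key_other tcp_other tcp_hport_scans tcp_lport_scans tcp_hnetwork_scans tcp_lnetwork_scans tcp_oflow_final small_syns_final → Spec_tcp_remove_key_other tcp_other tcp_hport_scans tcp_lport_scans tcp_hnetwork_scans tcp_lnetwork_scans tcp_oflow_final small_syns_final (tcp_remove_key_other tcp_other tcp_hport_scans tcp_lport_scans tcp_hnetwork_scans tcp_lnetwork_scans tcp_oflow_final small_syns_final)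

-- ===== LEMMAS AND PROOFS =====

lemma pvNodupKeys_filter (d : List (String × Int)) (q : String × Int → Bool)
    (h : (d.map Prod.fst).Nodup) : ((d.filter q).map Prod.fst).Nodup :=
  h.sublist (List.Sublist.map Prod.fst List.filter_sublist)

lemma pvErase_eq_filter (d : List (String × Int)) (k : String)
    (h : (d.map Prod.fst).Nodup) :
    d.eraseP (fun p => p.1 == k) = d.filter (fun p => p.1 != k) := by
  induction d with
  | nil => rfl
  | cons a d ih =>
    simp only [List.map_cons, List.nodup_cons] at h
    by_cases hk : a.1 == k
    · have ha : a.1 = k := eq_of_beq hk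
      simp only [List.eraseP_cons, List.filter_cons, hk, cond_true, bne, Bool.not_true]
      rw [if_neg (by simp)]
      symm
      rw [List.filter_eq_self]
      intro p hp
      have hne : p.1 ≠ a.1 := fun e => h.1 (e ▸ List.mem_map_of_mem hp)
      exact bne_iff_ne.mpr (fun e : p.1 = k => hne (e.trans ha.symm))
    · simp only [List.eraseP_cons, hk, cond_false, List.filter_cons, bne, Bool.not_eq_true']
      rw [ih h.2, if_pos (by simpa using hk)]
      rfl

lemma pvFoldl_fst_erase_eq_filter {α : Type} (src : List (String × α)) (d : List (String × Int))
    (h : (d.map Prod.fst).Nodup) :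
    src.foldl (fun d k => d.eraseP (fun p => p.1 == k.1)) d
      = d.filter (fun p => !((src.map (fun k => k.1)).contains p.1)) := by
  induction src generalizing d with
  | nil => simp
  | cons k src ih =>
    simp only [List.foldl_cons, List.map_cons]
    rw [pvErase_eq_filter d k.1 h, ih _ (pvNodupKeys_filter d _ h), List.filter_filter]
    apply List.filter_congr
    intro p _
    by_cases hp : p.1 = k.1 <;> simp [hp, bne, Bool.and_comm]

lemma pvFoldl_condErase_eq_filter (ks : List String) (C : String → Bool) (d : List (String × Int))
    (h : (d.map Prod.fst).Nodup) :
    ks.foldl (fun d k => if C k then d.eraseP (fun p => p.1 == k) else d) d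
      = d.filter (fun p => !(ks.contains p.1 && C p.1)) := by
  induction ks generalizing d with
  | nil => simp
  | cons k ks ih =>
    simp only [List.foldl_cons]
    by_cases hC : C k
    · rw [if_pos hC, pvErase_eq_filter d k h, ih _ (pvNodupKeys_filter d _ h), List.filter_filter]
      apply List.filter_congr
      intro p _
      by_cases hp : p.1 = k <;> simp [hp, hC, bne, Bool.and_comm]
    · rw [if_neg hC, ih _ h]
      apply List.filter_congr
      intro p _
      by_cases hp : p.1 = k <;> simp [hp, hC]

-- scanning a dict's own key list: the 'key ∈ own keys' conjunct is vacuous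
lemma pvFilter_self_keys (e : List (String × Int)) (C : String → Bool) :
    e.filter (fun p => !((e.map (fun x => x.1)).contains p.1 && C p.1))
      = e.filter (fun p => !(C p.1)) := by
  apply List.filter_congr
  intro p hp
  have hm : p.1 ∈ e.map (fun x => x.1) := List.mem_map_of_mem hp
  simp [List.contains_eq_mem, hm]

-- ===== VERDICT (by name: the statement is the Claim_ definition above) =====
theorem tcp_remove_key_other_spec : Claim_equal_tcp_remove_key_other := by
  intro tcp_other h1 h2 h3 h4 h5 syns _ hpre
  unfold Spec_tcp_remove_key_other tcp_remove_key_other tcp_remove_key_other_alt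
  simp only [List.foldl_cons, List.foldl_nil]
  have hn0 : (tcp_other.map Prod.fst).Nodup := hpre
  -- A side: the two conditional-erase scans over the dict's own keys become filters
  rw [pvFoldl_condErase_eq_filter _ _ _ hn0]
  rw [pvFoldl_condErase_eq_filter _ _ _ (pvNodupKeys_filter _ _ hn0)]
  rw [pvFilter_self_keys, pvFilter_self_keys]
  -- B side: the six unconditional pop loops become filters
  rw [pvFoldl_fst_erase_eq_filter h1 _ hn0,
      pvFoldl_fst_erase_eq_filter h2 _ (pvNodupKeys_filter _ _ hn0),
      pvFoldl_fst_erase_eq_filter h3 _ (pvNodupKeys_filter _ _ (pvNodupKeys_filter _ _ hn0)),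
      pvFoldl_fst_erase_eq_filter h4 _ (pvNodupKeys_filter _ _ (pvNodupKeys_filter _ _ (pvNodupKeys_filter _ _ hn0))),
      pvFoldl_fst_erase_eq_filter h5 _ (pvNodupKeys_filter _ _ (pvNodupKeys_filter _ _ (pvNodupKeys_filter _ _ (pvNodupKeys_filter _ _ hn0)))),
      pvFoldl_fst_erase_eq_filter syns _ (pvNodupKeys_filter _ _ (pvNodupKeys_filter _ _ (pvNodupKeys_filter _ _ (pvNodupKeys_filter _ _ (pvNodupKeys_filter _ _ hn0)))))]
  simp only [List.filter_filter]
  -- both sides are filters of tcp_other: the predicates agree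
  apply List.filter_congr
  intro p _
  rw [Bool.eq_iff_iff]
  simp [List.contains_eq_mem, PySem.Set.mem_ofList, List.mem_append]
  tauto
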